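-- pv_equiv track=rewrite | github.com/Infundibulum/FinalYearProject | preprocess.py | replace_genitive
-- ===== SOURCE A (Python) =====
-- def replace_genitive(sent):
--     words = sent.split(" ")
--     i = 0
--     newwords = []
--     while i < len(words):
--         word = words[i]
--         if word.find("'s") >= 0 or word.find("s'") >= 0:
--             newwords.append("of")
--             if word.find("s'") >= 0:
--                 newwords.append(word.replace("s'",""))
--             else:
--                 newwords.append(word.replace("'s",""))
--         else:
--             newwords.append(word)
--         i=i+1
--     return " ".join(newwords)
-- ===== SOURCE B (Python) =====
-- def _fix(w):
--     if "s'" in w: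
--         return "of " + w.replace("s'", "")
--     if "'s" in w:
--         return "of " + w.replace("'s", "")
--     return w
--
--
-- def replace_genitive(sent):
--     # single pass over the characters: emit each (fixed) word and its
--     # separating space as we meet it, instead of split -> loop -> join
--     res = []
--     tok = []
--     for ch in sent:
--         if ch == ' ':
--             res.append(_fix(''.join(tok)))
--             res.append(' ')
--             tok = []
--         else:
--             tok.append(ch)
--     res.append(_fix(''.join(tok)))
--     return ''.join(res)
-- ===== Notes on version B (the rewrite author's own statement) =====
-- stated objective: alternative
-- what changed: Replaces the split-into-words, index-driven while loop and final join by a single character-level scan that accumulates the current token and emits each fixed word and its separating space directly into the output.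
import Mathlib
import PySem

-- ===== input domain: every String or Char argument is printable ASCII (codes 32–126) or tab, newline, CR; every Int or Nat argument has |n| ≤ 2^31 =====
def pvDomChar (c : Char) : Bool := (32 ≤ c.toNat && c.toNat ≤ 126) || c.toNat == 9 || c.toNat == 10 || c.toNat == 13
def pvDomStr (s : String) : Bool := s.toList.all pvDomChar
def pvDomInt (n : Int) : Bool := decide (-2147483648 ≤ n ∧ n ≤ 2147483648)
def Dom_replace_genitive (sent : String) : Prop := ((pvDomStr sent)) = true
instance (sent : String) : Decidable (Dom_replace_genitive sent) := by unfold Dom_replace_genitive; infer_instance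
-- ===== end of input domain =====

-- B replaces split + index-loop + join by one character-level scan; alternative decomposition, same cost.

-- ===== PORT A =====
-- the while loop over `words`, building `newwords` front to back
def pvLoopA : List String → List String
  | [] => []
  | w :: rest =>
      (if PySem.Str.find w "'s" ≥ 0 || PySem.Str.find w "s'" ≥ 0 then
        if PySem.Str.find w "s'" ≥ 0 then ["of", PySem.Str.replace w "s'" ""]
        else ["of", PySem.Str.replace w "'s" ""]
      else [w]) ++ pvLoopA rest

def replace_genitive (sent : String) : String :=
  -- sent.split(" "): separator is nonempty, so split? is always `some`
  PySem.Str.join " " (pvLoopA ((PySem.Str.split? sent " ").getD []))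

-- ===== PORT B =====
-- _fix(w) on the character level
def pvFixB (w : List Char) : List Char :=
  if PySem.Chars.isIn ['s', '\''] w then 'o' :: 'f' :: ' ' :: PySem.Chars.replace w ['s', '\''] []
  else if PySem.Chars.isIn ['\'', 's'] w then 'o' :: 'f' :: ' ' :: PySem.Chars.replace w ['\'', 's'] []
  else w

-- the for-loop: `tok` is the current token, output emitted in order
def pvGoB : List Char → List Char → List Char
  | [], tok => pvFixB tok
  | c :: rest, tok =>
      if c = ' ' then pvFixB tok ++ ' ' :: pvGoB rest []
      else pvGoB rest (tok ++ [c])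

def replace_genitive_alt (sent : String) : String :=
  String.ofList (pvGoB sent.toList [])

-- ===== PRECONDITION & SPEC =====
def Spec_replace_genitive (sent : String) (out : String) : Prop := out = replace_genitive_alt sent
instance (sent : String) (out : String) : Decidable (Spec_replace_genitive sent out) := by unfold Spec_replace_genitive; infer_instance

-- ===== CLAIM (what is proved, stated in full; the proofs are below) =====
def Claim_equal_replace_genitive : Prop := ∀ (sent : String), Dom_replace_genitive sent → Spec_replace_genitive sent (replace_genitive sent)

-- ===== LEMMAS AND PROOFS =====

-- a simple structural model of `cs.split(' ')`
def pvSpl : List Char → List (List Char)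
  | [] => [[]]
  | c :: rest =>
      if c = ' ' then [] :: pvSpl rest
      else
        match pvSpl rest with
        | [] => [[c]]
        | h :: t => (c :: h) :: t

-- A's per-word contribution to `newwords`, on the character level
def pvFixA (w : List Char) : List (List Char) :=
  if 0 ≤ PySem.Chars.find w ['\'', 's'] ∨ 0 ≤ PySem.Chars.find w ['s', '\''] then
    if 0 ≤ PySem.Chars.find w ['s', '\''] then [['o', 'f'], PySem.Chars.replace w ['s', '\''] []]
    else [['o', 'f'], PySem.Chars.replace w ['\'', 's'] []]
  else [w]

theorem pvSpl_ne_nil (cs : List Char) : pvSpl cs ≠ [] := by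
  cases cs with
  | nil => simp [pvSpl]
  | cons c rest =>
    simp only [pvSpl]
    split
    · simp
    · split <;> simp

theorem pvSplitOn_go_eq (cs : List Char) : ∀ (fuel : Nat) (cur : List Char) (acc : List (List Char)),
    cs.length ≤ fuel →
    PySem.Chars.splitOn.go [' '] fuel cs cur acc =
      acc.reverse ++ (match pvSpl cs with
        | [] => []
        | h :: t => (cur.reverse ++ h) :: t) := by
  induction cs with
  | nil =>
    intro fuel cur acc _
    cases fuel <;> simp [PySem.Chars.splitOn.go, pvSpl]
  | cons c rest ih =>
    intro fuel cur acc hle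
    cases fuel with
    | zero => simp at hle
    | succ f =>
      by_cases hc : c = ' '
      · subst hc
        have hpre : [' '].isPrefixOf (' ' :: rest) = true := by simp [List.isPrefixOf]
        rw [PySem.Chars.splitOn.go, if_pos hpre]
        simp only [List.length_cons, List.length_nil, Nat.zero_add, List.drop_succ_cons,
          List.drop_zero, Nat.succ_le_succ_iff] at hle ⊢
        rw [ih f [] (cur.reverse :: acc) (by simpa using hle)]
        have h2 := pvSpl_ne_nil rest
        cases hs : pvSpl rest with
        | nil => exact absurd hs h2
        | cons h t => simp [pvSpl, hs]
      · have hpre : [' '].isPrefixOf (c :: rest) = false := by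
          simp [List.isPrefixOf]
          exact fun h => hc h.symm
        rw [PySem.Chars.splitOn.go, if_neg (by simp [hpre])]
        simp only [List.length_cons, Nat.succ_le_succ_iff] at hle
        rw [ih f (c :: cur) acc hle]
        have h2 := pvSpl_ne_nil rest
        cases hs : pvSpl rest with
        | nil => exact absurd hs h2
        | cons h t => simp [pvSpl, hc, hs]

theorem pvSplitOn_eq (cs : List Char) : PySem.Chars.splitOn cs [' '] = pvSpl cs := by
  rw [PySem.Chars.splitOn, pvSplitOn_go_eq cs (cs.length + 1) [] [] (by omega)]
  have h2 := pvSpl_ne_nil cs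
  cases hs : pvSpl cs with
  | nil => exact absurd hs h2
  | cons h t => simp

-- A's loop, moved to the character level
theorem pvLoopA_eq (parts : List (List Char)) :
    (pvLoopA (parts.map String.ofList)).map String.toList = parts.flatMap pvFixA := by
  induction parts with
  | nil => simp [pvLoopA]
  | cons w rest ih =>
    simp only [List.map_cons, pvLoopA, List.flatMap_cons, List.map_append, ih]
    congr 1
    have e1 : "'s".toList = ['\'', 's'] := rfl
    have e2 : "s'".toList = ['s', '\''] := rfl
    have e3 : "of".toList = ['o', 'f'] := rfl
    have e4 : "".toList = ([] : List Char) := rfl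
    by_cases ha : (0:Int) ≤ PySem.Chars.find w ['\'', 's'] <;>
      by_cases hb : (0:Int) ≤ PySem.Chars.find w ['s', '\''] <;>
        simp [pvFixA, ha, hb, e1, e2, e3, e4, PySem.Str.replace]

-- one word: joining A's one or two appended words equals B's _fix
theorem pvFix_one (w : List Char) :
    PySem.Chars.join [' '] (pvFixA w) = pvFixB w := by
  unfold pvFixA pvFixB
  by_cases hs : ['s', '\''] <:+: w <;> by_cases ha : ['\'', 's'] <:+: w <;>
    simp [PySem.Chars.find_nonneg_iff, PySem.Chars.isIn_iff_infix, hs, ha,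
      PySem.Chars.join_cons_cons, PySem.Chars.join_singleton]

theorem pvJoin_flatMap (ws : List (List Char)) :
    PySem.Chars.join [' '] (ws.flatMap pvFixA) = PySem.Chars.join [' '] (ws.map pvFixB) := by
  induction ws with
  | nil => simp
  | cons w rest ih =>
    cases rest with
    | nil => simpa [PySem.Chars.join_singleton] using pvFix_one w
    | cons v vs =>
      have hne : (v :: vs).flatMap pvFixA ≠ [] := by
        simp only [List.flatMap_cons]
        unfold pvFixA
        split_ifs <;> simp
      have key : ∀ (l : List (List Char)), l ≠ [] →
          PySem.Chars.join [' '] (pvFixA w ++ l) =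
            pvFixB w ++ ' ' :: PySem.Chars.join [' '] l := by
        intro l hl
        cases l with
        | nil => exact absurd rfl hl
        | cons x xs =>
          rw [← pvFix_one w]
          unfold pvFixA
          split_ifs <;>
            simp [PySem.Chars.join_cons_cons, PySem.Chars.join_singleton, List.append_assoc]
      rw [List.flatMap_cons, key _ hne, ih]
      simp only [List.map_cons, PySem.Chars.join_cons_cons]
      simp

-- B's scan renders the words of `tok ++ cs`
theorem pvGoB_eq (cs : List Char) : ∀ (tok : List Char),
    pvGoB cs tok =
      PySem.Chars.join [' '] ((match pvSpl cs with
        | [] => []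
        | h :: t => (tok ++ h) :: t).map pvFixB) := by
  induction cs with
  | nil => intro tok; simp [pvGoB, pvSpl, PySem.Chars.join_singleton]
  | cons c rest ih =>
    intro tok
    by_cases hc : c = ' '
    · subst hc
      have h2 := pvSpl_ne_nil rest
      cases hs : pvSpl rest with
      | nil => exact absurd hs h2
      | cons h t =>
        simp only [pvGoB, ih [], hs, pvSpl, List.nil_append, List.map_cons]
        simp [PySem.Chars.join_cons_cons]
    · have h2 := pvSpl_ne_nil rest
      cases hs : pvSpl rest with
      | nil => exact absurd hs h2
      | cons h t =>
        simp only [pvGoB, if_neg hc, ih (tok ++ [c]), hs, pvSpl, List.map_cons]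
        simp

-- ===== VERDICT (by name: the statement is the Claim_ definition above) =====
theorem replace_genitive_spec : Claim_equal_replace_genitive := by
  intro sent _
  unfold Spec_replace_genitive replace_genitive replace_genitive_alt
  have hsplit : (PySem.Str.split? sent " ").getD [] =
      (pvSpl sent.toList).map String.ofList := by
    simp [PySem.Str.split?, PySem.Chars.split?, pvSplitOn_eq]
  rw [hsplit]
  have hjoin : ∀ (l : List String),
      PySem.Str.join " " l = String.ofList (PySem.Chars.join [' '] (l.map String.toList)) := by
    intro l; rfl
  rw [hjoin, pvLoopA_eq, pvJoin_flatMap, pvGoB_eq sent.toList []]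
  have h2 := pvSpl_ne_nil sent.toList
  cases hs : pvSpl sent.toList with
  | nil => exact absurd hs h2
  | cons h t => simp
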